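-- pv_equiv track=rewrite | github.com/TheMaster1127/HT-plus-plus | HT++.py | isVarAnumKindaVar
-- ===== SOURCE A (Python) =====
-- variables = {}
--
-- def InStr(Haystack, Needle, CaseSensitive=True, StartingPos=1, Occurrence=1):
--     if Haystack is None or Needle is None:
--         return False
--     StartingPos = max(StartingPos, 1)
--     if not CaseSensitive:
--         Haystack = Haystack.lower()
--         Needle = Needle.lower()
--     count = 0
--     for i in range(StartingPos - 1, len(Haystack)):
--         if Haystack[i:i + len(Needle)] == Needle:
--             count += 1
--             if count == Occurrence:
--                 return True
--     return False
--
-- def Chr(number):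
--     # Check if the number is None
--     if number is None:
--         # Return an empty string
--         return ""
--     # Check if the number is within the valid Unicode range
--     if 0 <= number <= 0x10FFFF:
--         # Convert the number to a character using chr()
--         return chr(number)
--     else:
--         # Return an empty string for invalid numbers
--         return ""
--
-- def isVarAnumKindaVar(strrrrr):
--     variables['strrrrr'] = strrrrr
--     variables['strLettersStart'] = 48
--     for A_Index1 in range(1, 10 + 1):
--         variables['A_Index1'] = A_Index1
--         if (InStr(variables['strrrrr'] , Chr(variables['strLettersStart']))):
--             return True
--         variables['strLettersStart'] += 1
--     return False
-- ===== SOURCE B (Python) =====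
-- def isVarAnumKindaVar(strrrrr):
--     if strrrrr is None:
--         return False
--     for c in strrrrr:
--         if c in '0123456789':
--             return True
--     return False
-- ===== Notes on version B (the rewrite author's own statement) =====
-- stated objective: simpler
-- what changed: Replaces ten separate full-string InStr substring scans (one per digit '0'-'9') and the global variables bookkeeping with a single linear pass that returns True at the first ASCII digit character.
import Mathlib
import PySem

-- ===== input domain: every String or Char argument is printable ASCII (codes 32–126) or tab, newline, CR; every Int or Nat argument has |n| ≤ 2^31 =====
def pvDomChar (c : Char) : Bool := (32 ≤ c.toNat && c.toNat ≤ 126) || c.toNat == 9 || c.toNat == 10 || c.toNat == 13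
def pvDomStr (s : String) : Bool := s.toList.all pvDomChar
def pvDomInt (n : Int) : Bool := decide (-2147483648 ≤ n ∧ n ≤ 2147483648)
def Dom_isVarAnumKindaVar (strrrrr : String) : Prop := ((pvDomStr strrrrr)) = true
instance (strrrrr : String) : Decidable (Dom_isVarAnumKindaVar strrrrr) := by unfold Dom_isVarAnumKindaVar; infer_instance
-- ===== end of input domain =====

-- B replaces A's ten full-string InStr scans (one per digit '0'-'9') with one linear pass
-- returning true at the first ASCII digit; objective: simpler. Return-value equivalence only:
-- A also mutates the module-global `variables` dict, which B does not.

-- ===== PORT A =====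
-- InStr's inner loop (CaseSensitive=True, StartingPos=1, Occurrence=1 as called by A):
-- for i in range(0, len(hay)): if hay[i:i+len(need)] == need: count += 1; if count == 1: return True
def pvInStrLoop (hay need : List Char) (count : Int) (i : Nat) : Bool :=
  if i < hay.length then
    if PySem.List.slice hay (some (i : Int)) (some ((i : Int) + (need.length : Int))) == need then
      (if count + 1 == 1 then true else pvInStrLoop hay need (count + 1) (i + 1))
    else pvInStrLoop hay need count (i + 1)
  else false
termination_by hay.length - i

def pvInStr (hay need : List Char) : Bool := pvInStrLoop hay need 0 0

-- Chr(n): character for 0 <= n <= 0x10FFFF, else "" (as a character list)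
def pvChr (n : Int) : List Char :=
  if 0 ≤ n ∧ n ≤ 0x10FFFF then [Char.ofNat n.toNat] else []

-- for A_Index1 in range(1, 11): if InStr(strrrrr, Chr(strLettersStart)): return True; strLettersStart += 1
def pvALoop (s : List Char) (letters : Int) : Nat → Bool
  | 0 => false
  | n + 1 => if pvInStr s (pvChr letters) then true else pvALoop s (letters + 1) n

def isVarAnumKindaVar (strrrrr : String) : Bool :=
  pvALoop strrrrr.toList 48 10

-- ===== PORT B =====
def isVarAnumKindaVar_alt (strrrrr : String) : Bool :=
  strrrrr.toList.any (fun c => c ∈ ['0','1','2','3','4','5','6','7','8','9'])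

-- ===== PRECONDITION & SPEC =====
def Spec_isVarAnumKindaVar (strrrrr : String) (out : Bool) : Prop := out = isVarAnumKindaVar_alt strrrrr
instance (strrrrr : String) (out : Bool) : Decidable (Spec_isVarAnumKindaVar strrrrr out) := by unfold Spec_isVarAnumKindaVar; infer_instance

-- ===== CLAIM (what is proved, stated in full; the proofs are below) =====
def Claim_equal_isVarAnumKindaVar : Prop := ∀ (strrrrr : String), Dom_isVarAnumKindaVar strrrrr → Spec_isVarAnumKindaVar strrrrr (isVarAnumKindaVar strrrrr)

-- ===== LEMMAS AND PROOFS =====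

-- InStr on a single-character needle starting at i is membership in (hay.drop i)
theorem pvInStrLoop_single_aux (hay : List Char) (c : Char) :
    ∀ (k i : Nat), hay.length ≤ i + k →
      pvInStrLoop hay [c] 0 i = (hay.drop i).any (· == c) := by
  intro k
  induction k with
  | zero =>
    intro i hk
    rw [pvInStrLoop]
    have h1 : ¬ i < hay.length := by omega
    have h2 : hay.drop i = [] := List.drop_eq_nil_of_le (by omega)
    simp [h1, h2]
  | succ k ih =>
    intro i hk
    rw [pvInStrLoop]
    by_cases h : i < hay.length
    · have hslice : PySem.List.slice hay (some (i : Int)) (some ((i : Int) + (([c] : List Char).length : Int)))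
          = (hay.drop i).take 1 := by
        simpa using PySem.List.slice_natCast_add hay i 1
      have hdrop : hay.drop i = hay[i] :: hay.drop (i + 1) := List.drop_eq_getElem_cons h
      simp only [h, if_true, hslice, hdrop]
      by_cases he : hay[i] = c
      · simp [he]
      · have hne : ¬ ([hay[i]] == [c]) = true := by simp [he]
        simp only [List.take_succ_cons, List.take_zero, hne]
        rw [ih (i + 1) (by omega), List.any_cons]
        have hf : (hay[i] == c) = false := by simp [he]
        rw [hf, Bool.false_or]
        simp
    · have h2 : hay.drop i = [] := List.drop_eq_nil_of_le (by omega)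
      simp [h, h2]

theorem pvInStr_single (hay : List Char) (c : Char) :
    pvInStr hay [c] = hay.any (· == c) := by
  simpa using pvInStrLoop_single_aux hay c hay.length 0 (by omega)

-- ===== VERDICT (by name: the statement is the Claim_ definition above) =====
theorem isVarAnumKindaVar_spec : Claim_equal_isVarAnumKindaVar := by
  intro s _
  show isVarAnumKindaVar s = isVarAnumKindaVar_alt s
  unfold isVarAnumKindaVar isVarAnumKindaVar_alt
  have h48 : pvChr 48 = ['0'] := by decide
  have h49 : pvChr 49 = ['1'] := by decide
  have h50 : pvChr 50 = ['2'] := by decide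
  have h51 : pvChr 51 = ['3'] := by decide
  have h52 : pvChr 52 = ['4'] := by decide
  have h53 : pvChr 53 = ['5'] := by decide
  have h54 : pvChr 54 = ['6'] := by decide
  have h55 : pvChr 55 = ['7'] := by decide
  have h56 : pvChr 56 = ['8'] := by decide
  have h57 : pvChr 57 = ['9'] := by decide
  simp only [pvALoop, show (48:Int)+1 = 49 by norm_num, show (49:Int)+1 = 50 by norm_num,
    show (50:Int)+1 = 51 by norm_num, show (51:Int)+1 = 52 by norm_num,
    show (52:Int)+1 = 53 by norm_num, show (53:Int)+1 = 54 by norm_num,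
    show (54:Int)+1 = 55 by norm_num, show (55:Int)+1 = 56 by norm_num,
    show (56:Int)+1 = 57 by norm_num,
    h48, h49, h50, h51, h52, h53, h54, h55, h56, h57, pvInStr_single,
    Bool.if_true_left]
  apply Bool.eq_iff_iff.mpr
  simp only [Bool.or_eq_true, List.any_eq_true, beq_iff_eq, List.mem_cons,
    List.not_mem_nil, or_false, decide_eq_true_eq]
  aesop
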